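-- pv_equiv track=rewrite | github.com/mhoehle/hoehleatsu.github.io | figure/source/2023-03-20-dynprog/value_iteration.py | make_states
-- ===== SOURCE A (Python) =====
-- def make_situations(n):
--     """Returns all situations in a game with n sticks left
--
--     Parameters
--     ----------
--     n : int
--         The number of sticks left in the game
--
--     Returns
--     -------
--     list
--         a list of with entries [i,j,k]
--     """
--     res = []
--     # Number of sticks in the lid
--     for i in range(min(n,5),-1,-1):
--         # Number of sticks of player 1
--         for j in range(n,0,-1):
--             # Number of sticks of player 2
--             k = n - i - j
--             # Only add valid states
--             if (i>=0  and not (j<=0 or k<=0)):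
--                 # Append the state as an array [i,j,k]
--                 res.append([i,j,k])
--     return(res)
--
-- def make_states(n):
--     """All states when there are n sticks in the game left
--
--     We distinguish between states with a choice if to throw the dice and those without
--
--     Parameters
--     ----------
--     n : int
--         The number of sticks left in the game
--
--     Returns
--     -------
--     list
--         a list of with entries [i,j,k]
--     """
--     states = []
--     for i in range(1,n+1):
--         s = make_situations(i)
--         # Make list comprehension which adds a fourth component indicating if the move is forced (0=no, 1=yes)
--         for j in range(2):
--             states.extend([x + [j] for x in s])
--     # Sort the list
--     states.sort(reverse=True)
--     return(states)
-- ===== SOURCE B (Python) =====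
-- def make_states(n):
--     """All states with at most n sticks left, generated directly in
--     descending lexicographic order (no sort): lid desc, p1 desc, p2 desc, forced desc."""
--     states = []
--     for lid in range(min(n, 5), -1, -1):
--         for p1 in range(n - lid - 1, 0, -1):
--             for p2 in range(n - lid - p1, 0, -1):
--                 for forced in (1, 0):
--                     states.append([lid, p1, p2, forced])
--     return states
-- ===== Notes on version B (the rewrite author's own statement) =====
-- stated objective: alternative
-- what changed: B generates the states directly in descending lexicographic order via one nested loop nest over (lid, p1, p2, forced), eliminating A's per-total re-enumeration and its final sort of the quadratically sized list (intended as faster; measured 3.26x at the largest size both finished, unconfirmed at the largest probe where both time out on the huge output).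
import Mathlib
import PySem

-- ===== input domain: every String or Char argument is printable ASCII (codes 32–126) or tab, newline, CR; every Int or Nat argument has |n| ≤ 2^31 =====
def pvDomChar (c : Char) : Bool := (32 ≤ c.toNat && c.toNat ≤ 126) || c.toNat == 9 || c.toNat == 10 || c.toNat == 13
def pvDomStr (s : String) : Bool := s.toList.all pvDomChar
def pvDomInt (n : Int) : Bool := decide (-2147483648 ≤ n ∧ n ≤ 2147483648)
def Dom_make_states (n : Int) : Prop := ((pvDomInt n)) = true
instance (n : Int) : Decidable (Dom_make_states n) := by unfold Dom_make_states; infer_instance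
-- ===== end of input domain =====

-- B generates the states directly in descending lexicographic order with nested loops
-- over (lid, p1, p2, forced), so A's generate-then-sort pass disappears (objective: alternative).

-- ===== PORT A =====
def make_situations (n : Int) : List (List Int) :=
  (PySem.List.pyRange (min n 5) (-1) (-1)).foldl (fun res i =>
    (PySem.List.pyRange n 0 (-1)).foldl (fun res j =>
      let k := n - i - j
      if 0 ≤ i ∧ ¬(j ≤ 0 ∨ k ≤ 0) then res ++ [[i, j, k]] else res) res) []

def make_states (n : Int) : List (List Int) :=
  let states := (PySem.List.pyRange 1 (n + 1) 1).foldl (fun states i =>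
    let s := make_situations i
    (PySem.List.pyRange 0 2 1).foldl (fun states j =>
      states ++ s.map (fun x => x ++ [j])) states) []
  PySem.List.sorted states (fun x => x) true

-- ===== PORT B =====
def make_states_alt (n : Int) : List (List Int) :=
  (PySem.List.pyRange (min n 5) (-1) (-1)).foldl (fun st lid =>
    (PySem.List.pyRange (n - lid - 1) 0 (-1)).foldl (fun st p1 =>
      (PySem.List.pyRange (n - lid - p1) 0 (-1)).foldl (fun st p2 =>
        ([1, 0] : List Int).foldl (fun st forced => st ++ [[lid, p1, p2, forced]]) st) st) st) []

-- ===== PRECONDITION & SPEC =====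
def Spec_make_states (n : Int) (out : List (List Int)) : Prop := out = make_states_alt n
instance (n : Int) (out : List (List Int)) : Decidable (Spec_make_states n out) := by unfold Spec_make_states; infer_instance

-- ===== CLAIM (what is proved, stated in full; the proofs are below) =====
def Claim_equal_make_states : Prop := ∀ (n : Int), Dom_make_states n → Spec_make_states n (make_states n)

-- ===== LEMMAS AND PROOFS =====

-- flat (flatMap) views of the two programs' loop nests
def sitFlat (i : Int) : List (List Int) :=
  (PySem.List.pyRange (min i 5) (-1) (-1)).flatMap (fun lid =>
    ((PySem.List.pyRange i 0 (-1)).filter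
        (fun j => decide (0 ≤ lid ∧ ¬(j ≤ 0 ∨ i - lid - j ≤ 0)))).map
      (fun j => [lid, j, i - lid - j]))

def unsortedA (n : Int) : List (List Int) :=
  (PySem.List.pyRange 1 (n + 1) 1).flatMap (fun i =>
    (PySem.List.pyRange 0 2 1).flatMap (fun j =>
      (sitFlat i).map (fun x => x ++ [j])))

def stateSet (n : Int) : List (List Int) :=
  (PySem.List.pyRange (min n 5) (-1) (-1)).flatMap (fun lid =>
    (PySem.List.pyRange (n - lid - 1) 0 (-1)).flatMap (fun p1 =>
      (PySem.List.pyRange (n - lid - p1) 0 (-1)).flatMap (fun p2 =>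
        [[lid, p1, p2, 1], [lid, p1, p2, 0]])))

-- the common membership predicate: lid sticks in the lid (≤ 5), both players ≥ 1 stick,
-- at most n sticks in play, forced flag 0/1
def StateP (n : Int) (x : List Int) : Prop :=
  ∃ lid p1 p2 f : Int, x = [lid, p1, p2, f] ∧ 0 ≤ lid ∧ lid ≤ 5 ∧
    1 ≤ p1 ∧ 1 ≤ p2 ∧ lid + p1 + p2 ≤ n ∧ (f = 1 ∨ f = 0)

theorem situations_flat (i : Int) : make_situations i = sitFlat i := by
  unfold make_situations sitFlat
  have h : (fun (res : List (List Int)) (lid : Int) =>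
      (PySem.List.pyRange i 0 (-1)).foldl (fun res j =>
        let k := i - lid - j
        if 0 ≤ lid ∧ ¬(j ≤ 0 ∨ k ≤ 0) then res ++ [[lid, j, k]] else res) res)
      = (fun res lid => res ++
        ((PySem.List.pyRange i 0 (-1)).filter
          (fun j => decide (0 ≤ lid ∧ ¬(j ≤ 0 ∨ i - lid - j ≤ 0)))).map
          (fun j => [lid, j, i - lid - j])) := by
    funext res lid
    exact PySem.List.foldl_append_ite _ _ _ _
  rw [h, PySem.List.foldl_append_eq_flatMap]
  simp

theorem states_eq_sorted (n : Int) :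
    make_states n = PySem.List.sorted (unsortedA n) (fun x => x) true := by
  unfold make_states unsortedA
  have h : (fun (states : List (List Int)) (i : Int) =>
      let s := make_situations i
      (PySem.List.pyRange 0 2 1).foldl (fun states j =>
        states ++ s.map (fun x => x ++ [j])) states)
      = (fun states i => states ++ (PySem.List.pyRange 0 2 1).flatMap (fun j =>
          (make_situations i).map (fun x => x ++ [j]))) := by
    funext states i
    exact PySem.List.foldl_append_eq_flatMap _ _ _
  rw [h, PySem.List.foldl_append_eq_flatMap]
  simp [situations_flat]

theorem alt_eq_stateSet (n : Int) : make_states_alt n = stateSet n := by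
  unfold make_states_alt stateSet
  have h1 : ∀ lid : Int, (fun (st : List (List Int)) (p1 : Int) =>
      (PySem.List.pyRange (n - lid - p1) 0 (-1)).foldl (fun st p2 =>
        ([1, 0] : List Int).foldl (fun st forced => st ++ [[lid, p1, p2, forced]]) st) st)
      = (fun st p1 => st ++ (PySem.List.pyRange (n - lid - p1) 0 (-1)).flatMap (fun p2 =>
          [[lid, p1, p2, 1], [lid, p1, p2, 0]])) := by
    intro lid; funext st p1
    have h0 : (fun (st : List (List Int)) (p2 : Int) =>
        ([1, 0] : List Int).foldl (fun st forced => st ++ [[lid, p1, p2, forced]]) st)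
        = (fun st p2 => st ++ [[lid, p1, p2, 1], [lid, p1, p2, 0]]) := by
      funext st p2; simp [List.foldl]
    rw [h0, PySem.List.foldl_append_eq_flatMap]
  have h2 : (fun (st : List (List Int)) (lid : Int) =>
      (PySem.List.pyRange (n - lid - 1) 0 (-1)).foldl (fun st p1 =>
        (PySem.List.pyRange (n - lid - p1) 0 (-1)).foldl (fun st p2 =>
          ([1, 0] : List Int).foldl (fun st forced => st ++ [[lid, p1, p2, forced]]) st) st) st)
      = (fun st lid => st ++ (PySem.List.pyRange (n - lid - 1) 0 (-1)).flatMap (fun p1 =>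
          (PySem.List.pyRange (n - lid - p1) 0 (-1)).flatMap (fun p2 =>
            [[lid, p1, p2, 1], [lid, p1, p2, 0]]))) := by
    funext st lid
    rw [h1 lid, PySem.List.foldl_append_eq_flatMap]
  rw [h2, PySem.List.foldl_append_eq_flatMap]
  simp

theorem mem_stateSet (n : Int) (x : List Int) : x ∈ stateSet n ↔ StateP n x := by
  simp only [stateSet, StateP, List.mem_flatMap, PySem.List.mem_pyRange_neg_one,
    List.mem_cons, List.not_mem_nil, or_false]
  constructor
  · rintro ⟨lid, ⟨h1, h2⟩, p1, ⟨h3, h4⟩, p2, ⟨h5, h6⟩, hx | hx⟩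
    · exact ⟨lid, p1, p2, 1, hx, by omega, by omega, by omega, by omega, by omega, Or.inl rfl⟩
    · exact ⟨lid, p1, p2, 0, hx, by omega, by omega, by omega, by omega, by omega, Or.inr rfl⟩
  · rintro ⟨lid, p1, p2, f, hx, h1, h2, h3, h4, h5, hf⟩
    refine ⟨lid, by omega, p1, by omega, p2, by omega, ?_⟩
    rcases hf with rfl | rfl
    · exact Or.inl hx
    · exact Or.inr hx

theorem mem_unsortedA (n : Int) (x : List Int) : x ∈ unsortedA n ↔ StateP n x := by
  simp only [unsortedA, sitFlat, StateP, List.mem_flatMap, List.mem_map,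
    PySem.List.mem_pyRange_one, PySem.List.mem_pyRange_neg_one, List.mem_filter,
    decide_eq_true_eq]
  constructor
  · rintro ⟨i, ⟨hi1, hi2⟩, j, ⟨hj1, hj2⟩, y, ⟨lid, ⟨hl1, hl2⟩, p1, ⟨⟨hp1, hp2⟩, hc⟩, hy⟩, hx⟩
    refine ⟨lid, p1, i - lid - p1, j, ?_, by omega, by omega, by omega, by omega, by omega, by omega⟩
    subst hy hx; rfl
  · rintro ⟨lid, p1, p2, f, hx, h1, h2, h3, h4, h5, hf⟩
    refine ⟨lid + p1 + p2, by omega, f, by omega, [lid, p1, lid + p1 + p2 - lid - p1],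
      ⟨lid, by omega, p1, ⟨⟨by omega, by omega⟩, by constructor <;> omega⟩, rfl⟩, ?_⟩
    subst hx
    have h6 : lid + p1 + p2 - lid - p1 = p2 := by omega
    rw [h6]; rfl

theorem lt_head {a a' : Int} (h : a < a') (r r' : List Int) : (a :: r) < (a' :: r') :=
  List.cons_lt_cons_iff.mpr (Or.inl h)

theorem lt_tail {a : Int} {r r' : List Int} (h : r < r') : (a :: r) < (a :: r') :=
  List.cons_lt_cons_iff.mpr (Or.inr ⟨rfl, h⟩)

theorem pyRange_neg_pairwise (a b : Int) :
    (PySem.List.pyRange a b (-1)).Pairwise (fun x y => y < x) := by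
  rw [PySem.List.pyRange_neg_one_eq_reverse, List.pairwise_reverse]
  exact PySem.List.pairwise_lt_pyRange_one _ _

theorem pairwise_gt_stateSet (n : Int) :
    (stateSet n).Pairwise (fun a b => b < a) := by
  unfold stateSet
  rw [List.pairwise_flatMap]
  constructor
  · intro lid _
    rw [List.pairwise_flatMap]
    constructor
    · intro p1 _
      rw [List.pairwise_flatMap]
      constructor
      · intro p2 _
        refine List.Pairwise.cons ?_ (List.pairwise_singleton _ _)
        intro y hy
        simp only [List.mem_singleton] at hy
        subst hy
        exact lt_tail (lt_tail (lt_tail (lt_head (by omega) [] [])))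
      · refine (pyRange_neg_pairwise _ _).imp ?_
        rintro p2 p2' h x hx y hy
        simp only [List.mem_cons, List.not_mem_nil, or_false] at hx hy
        rcases hx with rfl | rfl <;> rcases hy with rfl | rfl <;>
          exact lt_tail (lt_tail (lt_head h _ _))
    · refine (pyRange_neg_pairwise _ _).imp ?_
      rintro p1 p1' h x hx y hy
      simp only [List.mem_flatMap, List.mem_cons, List.not_mem_nil, or_false] at hx hy
      obtain ⟨p2, -, hx⟩ := hx
      obtain ⟨p2', -, hy⟩ := hy
      rcases hx with rfl | rfl <;> rcases hy with rfl | rfl <;>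
        exact lt_tail (lt_head h _ _)
  · refine (pyRange_neg_pairwise _ _).imp ?_
    rintro lid lid' h x hx y hy
    simp only [List.mem_flatMap, List.mem_cons, List.not_mem_nil, or_false] at hx hy
    obtain ⟨p1, -, p2, -, hx⟩ := hx
    obtain ⟨p1', -, p2', -, hy⟩ := hy
    rcases hx with rfl | rfl <;> rcases hy with rfl | rfl <;>
      exact lt_head h _ _

theorem nodup_sitFlat (i : Int) : (sitFlat i).Nodup := by
  unfold sitFlat List.Nodup
  rw [List.pairwise_flatMap]
  constructor
  · intro lid _
    rw [List.pairwise_map]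
    refine ((pyRange_neg_pairwise i 0).filter _).imp ?_
    intro p1 p1' h hE
    simp only [List.cons.injEq] at hE
    omega
  · refine (pyRange_neg_pairwise _ _).imp ?_
    rintro lid lid' h x hx y hy
    simp only [List.mem_map, List.mem_filter] at hx hy
    obtain ⟨p1, -, rfl⟩ := hx
    obtain ⟨p1', -, rfl⟩ := hy
    intro hE
    simp only [List.cons.injEq] at hE
    omega

theorem mem_sitFlat_shape (i : Int) (x : List Int) (h : x ∈ sitFlat i) :
    ∃ lid p1 k : Int, x = [lid, p1, k] ∧ lid + p1 + k = i := by
  unfold sitFlat at h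
  simp only [List.mem_flatMap, List.mem_map, List.mem_filter] at h
  obtain ⟨lid, -, p1, -, rfl⟩ := h
  exact ⟨lid, p1, i - lid - p1, rfl, by omega⟩

theorem nodup_unsortedA (n : Int) : (unsortedA n).Nodup := by
  unfold unsortedA List.Nodup
  rw [List.pairwise_flatMap]
  constructor
  · intro i _
    rw [List.pairwise_flatMap]
    constructor
    · intro j _
      rw [List.pairwise_map]
      exact (nodup_sitFlat i).imp (fun h hE => h (List.append_cancel_right hE))
    · refine (PySem.List.pairwise_lt_pyRange_one _ _).imp ?_
      rintro j j' h x hx y hy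
      simp only [List.mem_map] at hx hy
      obtain ⟨a, ha, rfl⟩ := hx
      obtain ⟨b, hb, rfl⟩ := hy
      obtain ⟨l1, q1, k1, rfl, -⟩ := mem_sitFlat_shape i a ha
      obtain ⟨l2, q2, k2, rfl, -⟩ := mem_sitFlat_shape i b hb
      intro hE
      simp only [List.cons_append, List.nil_append, List.cons.injEq] at hE
      omega
  · refine (PySem.List.pairwise_lt_pyRange_one _ _).imp ?_
    rintro i i' h x hx y hy
    simp only [List.mem_flatMap, List.mem_map] at hx hy
    obtain ⟨j, -, a, ha, rfl⟩ := hx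
    obtain ⟨j', -, b, hb, rfl⟩ := hy
    obtain ⟨l1, q1, k1, rfl, hs1⟩ := mem_sitFlat_shape i a ha
    obtain ⟨l2, q2, k2, rfl, hs2⟩ := mem_sitFlat_shape i' b hb
    intro hE
    simp only [List.cons_append, List.nil_append, List.cons.injEq] at hE
    omega

theorem stateSet_perm (n : Int) : (stateSet n).Perm (unsortedA n) := by
  refine (List.perm_ext_iff_of_nodup ?_ (nodup_unsortedA n)).mpr ?_
  · exact (pairwise_gt_stateSet n).imp (fun h => (ne_of_lt h).symm)
  · intro x; rw [mem_stateSet, mem_unsortedA]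

-- ===== VERDICT (by name: the statement is the Claim_ definition above) =====
theorem make_states_spec : Claim_equal_make_states := by
  intro n _
  unfold Spec_make_states
  rw [states_eq_sorted, alt_eq_stateSet]
  have h := PySem.List.sorted_rev_eq_of_perm_of_pairwise_gt (unsortedA n) (stateSet n)
    (fun x => x) (stateSet_perm n) (pairwise_gt_stateSet n)
  convert h using 2
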